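-- pv_equiv track=rewrite | github.com/r-1317/AtCoder | 2026/AHC064/a02.py | evaluate_mask
-- ===== SOURCE A (Python) =====
-- def is_valid_pairs(pairs):
-- 	dep_used = set()
-- 	sid_used = set()
-- 	for i, j in pairs:
-- 		if i in dep_used or j in sid_used:
-- 			return False
-- 		dep_used.add(i)
-- 		sid_used.add(j)
--
-- 	pairs_sorted = sorted(pairs)
-- 	for idx in range(len(pairs_sorted) - 1):
-- 		if not (pairs_sorted[idx][1] < pairs_sorted[idx + 1][1]):
-- 			return False
-- 	return True
--
-- def evaluate_mask(mask, candidates):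
-- 	pairs = []
-- 	cnt = 0
-- 	for idx, (i, j, _) in enumerate(candidates):
-- 		if (mask >> idx) & 1:
-- 			pairs.append((i, j))
-- 			cnt += 1
-- 	if cnt == 0:
-- 		return -10**9
-- 	if not is_valid_pairs(pairs):
-- 		return -10**6 + cnt
-- 	return cnt
-- ===== SOURCE B (Python) =====
-- def evaluate_mask(mask, candidates):
--     pairs = [(i, j) for idx, (i, j, _) in enumerate(candidates) if (mask >> idx) & 1]
--     cnt = len(pairs)
--     if cnt == 0:
--         return -10**9
--     ps = sorted(pairs)
--     prev = ps[0]
--     for cur in ps[1:]: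
--         if prev[0] == cur[0] or not prev[1] < cur[1]:
--             return -10**6 + cnt
--         prev = cur
--     return cnt
-- ===== Notes on version B (the rewrite author's own statement) =====
-- stated objective: simpler
-- what changed: The two-set uniqueness pass plus separate sorted index loop of is_valid_pairs is replaced by one sort followed by a single adjacent-pair scan (invalid iff some consecutive sorted pair has equal departure or non-increasing arrival); the dep_used/sid_used sets and the helper disappear.
import Mathlib
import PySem

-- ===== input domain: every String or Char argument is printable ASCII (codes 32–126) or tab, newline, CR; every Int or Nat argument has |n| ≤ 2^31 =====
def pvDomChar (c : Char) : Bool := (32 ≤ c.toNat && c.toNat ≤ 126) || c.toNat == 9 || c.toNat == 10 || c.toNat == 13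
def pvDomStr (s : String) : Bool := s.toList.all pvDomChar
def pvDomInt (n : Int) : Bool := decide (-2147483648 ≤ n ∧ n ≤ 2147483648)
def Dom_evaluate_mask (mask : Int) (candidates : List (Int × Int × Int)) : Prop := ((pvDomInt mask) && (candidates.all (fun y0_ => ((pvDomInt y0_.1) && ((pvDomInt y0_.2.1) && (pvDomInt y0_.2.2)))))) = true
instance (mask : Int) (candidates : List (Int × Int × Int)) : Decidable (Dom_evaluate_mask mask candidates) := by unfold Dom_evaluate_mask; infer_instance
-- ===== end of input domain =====

-- B replaces is_valid_pairs' two uniqueness sets + separate sorted index loop by one sort and a single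
-- adjacent-pair scan (objective: simpler); same return value on every input.

-- ===== PORT A =====
-- first loop of evaluate_mask: build pairs and count set mask bits
def pvPairsLoopA (mask : Int) (xs : List (Int × (Int × Int × Int)))
    (st : List (Int × Int) × Int) : List (Int × Int) × Int :=
  xs.foldl (fun st e =>
    if PySem.Int.band (mask >>> e.1.toNat) 1 ≠ 0 then (st.1 ++ [(e.2.1, e.2.2.1)], st.2 + 1) else st) st

-- first loop of is_valid_pairs: the dep_used / sid_used sets
def pvFirstPass : List (Int × Int) → PySem.Set Int → PySem.Set Int → Bool
  | [], _, _ => true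
  | p :: rest, dep, sid =>
    if PySem.Set.contains dep p.1 || PySem.Set.contains sid p.2 then false
    else pvFirstPass rest (PySem.Set.add dep p.1) (PySem.Set.add sid p.2)

-- second loop of is_valid_pairs over range(len-1); indexing is in range, ported with pyGetD
def pvSecondPass (ps : List (Int × Int)) : Bool :=
  (PySem.List.pyRange 0 ((ps.length : Int) - 1) 1).all
    (fun idx => decide ((PySem.List.pyGetD ps idx (0, 0)).2 < (PySem.List.pyGetD ps (idx + 1) (0, 0)).2))

def pv_is_valid_pairs (pairs : List (Int × Int)) : Bool :=
  pvFirstPass pairs PySem.Set.empty PySem.Set.empty &&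
    pvSecondPass (PySem.List.sorted2 pairs (fun p => p.1) (fun p => p.2) false)

def evaluate_mask (mask : Int) (candidates : List (Int × Int × Int)) : Int :=
  let st := pvPairsLoopA mask (PySem.List.enumerate candidates 0) ([], 0)
  if st.2 = 0 then -1000000000
  else if ¬ (pv_is_valid_pairs st.1 = true) then -1000000 + st.2
  else st.2

-- ===== PORT B =====
-- single adjacent-pair scan over the sorted list (prev/cur loop of Source B)
def pvAdjOk : List (Int × Int) → Bool
  | a :: b :: rest => if a.1 == b.1 || !decide (a.2 < b.2) then false else pvAdjOk (b :: rest)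
  | _ => true

def evaluate_mask_alt (mask : Int) (candidates : List (Int × Int × Int)) : Int :=
  let pairs := (PySem.List.enumerate candidates 0).filterMap
    (fun e => if PySem.Int.band (mask >>> e.1.toNat) 1 ≠ 0 then some (e.2.1, e.2.2.1) else none)
  if pairs.length = 0 then -1000000000
  else
    let ps := PySem.List.sorted2 pairs (fun p => p.1) (fun p => p.2) false
    if pvAdjOk ps then (pairs.length : Int) else -1000000 + (pairs.length : Int)

-- ===== PRECONDITION & SPEC =====
def Spec_evaluate_mask (mask : Int) (candidates : List (Int × Int × Int)) (out : Int) : Prop := out = evaluate_mask_alt mask candidates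
instance (mask : Int) (candidates : List (Int × Int × Int)) (out : Int) : Decidable (Spec_evaluate_mask mask candidates out) := by unfold Spec_evaluate_mask; infer_instance

-- ===== CLAIM (what is proved, stated in full; the proofs are below) =====
def Claim_equal_evaluate_mask : Prop := ∀ (mask : Int) (candidates : List (Int × Int × Int)), Dom_evaluate_mask mask candidates → Spec_evaluate_mask mask candidates (evaluate_mask mask candidates)

-- ===== LEMMAS AND PROOFS =====

-- A's accumulating loop computes B's comprehension together with its length
theorem pvPairsLoopA_eq (mask : Int) (xs : List (Int × (Int × Int × Int)))
    (acc : List (Int × Int)) (n : Int) :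
    pvPairsLoopA mask xs (acc, n)
      = (acc ++ xs.filterMap (fun e => if PySem.Int.band (mask >>> e.1.toNat) 1 ≠ 0 then some (e.2.1, e.2.2.1) else none),
         n + ((xs.filterMap (fun e => if PySem.Int.band (mask >>> e.1.toNat) 1 ≠ 0 then some (e.2.1, e.2.2.1) else none)).length : Int)) := by
  induction xs generalizing acc n with
  | nil => simp [pvPairsLoopA]
  | cons e rest ih =>
    rw [pvPairsLoopA, List.foldl_cons]
    dsimp only
    rw [List.filterMap_cons]
    by_cases h : PySem.Int.band (mask >>> (e.1.toNat : Int)) 1 ≠ 0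
    · simp only [if_pos h]
      rw [← pvPairsLoopA.eq_def, ih, Prod.mk.injEq]
      refine ⟨by simp, ?_⟩
      simp only [List.length_cons]
      push_cast
      ring
    · simp only [if_neg h]
      rw [← pvPairsLoopA.eq_def, ih]

-- Python's sorted on 2-tuples is sorting by the lexicographic key
theorem sorted2_eq_sorted_toLex (xs : List (Int × Int)) :
    PySem.List.sorted2 xs (fun p => p.1) (fun p => p.2) false
      = PySem.List.sorted xs (fun p => (toLex p : Int ×ₗ Int)) false := by
  have hbe : (fun a b : Int × Int => decide (a.1 < b.1) || (!decide (b.1 < a.1) && decide (a.2 < b.2)))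
      = (fun a b : Int × Int => decide ((toLex a : Int ×ₗ Int) < toLex b)) := by
    funext a b
    have hlt : ((toLex a : Int ×ₗ Int) < toLex b) ↔ (a.1 < b.1 ∨ (a.1 = b.1 ∧ a.2 < b.2)) := by
      rw [Prod.Lex.lt_iff]; rfl
    rw [Bool.eq_iff_iff]
    simp only [Bool.or_eq_true, Bool.and_eq_true, Bool.not_eq_true', decide_eq_true_eq,
      decide_eq_false_iff_not, hlt]
    omega
  have h1 : PySem.List.sorted2 xs (fun p => p.1) (fun p => p.2) false
      = List.foldl (fun acc x => PySem.List.insertBy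
          (fun a b : Int × Int => decide (a.1 < b.1) || (!decide (b.1 < a.1) && decide (a.2 < b.2))) x acc) [] xs := rfl
  rw [h1, PySem.List.sorted_eq_foldl_insertBy, hbe]

-- the set pass succeeds iff departures and arrivals are duplicate-free (and fresh w.r.t. the sets)
theorem pvFirstPass_iff (xs : List (Int × Int)) : ∀ (dep sid : PySem.Set Int),
    pvFirstPass xs dep sid = true ↔
      ((xs.map Prod.fst).Nodup ∧ (xs.map Prod.snd).Nodup ∧
        ∀ p ∈ xs, p.1 ∉ dep ∧ p.2 ∉ sid) := by
  induction xs with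
  | nil => intro dep sid; simp [pvFirstPass]
  | cons p rest ih =>
    intro dep sid
    simp only [pvFirstPass]
    by_cases h : (PySem.Set.contains dep p.1 || PySem.Set.contains sid p.2) = true
    · rw [if_pos h]
      simp only [Bool.or_eq_true, PySem.Set.contains_iff] at h
      constructor
      · intro hfalse; simp at hfalse
      · rintro ⟨-, -, hall⟩
        exfalso
        have := hall p (by simp)
        tauto
    · rw [if_neg h]
      simp only [Bool.or_eq_true, PySem.Set.contains_iff] at h
      push_neg at h
      rw [ih]
      simp only [List.map_cons, List.nodup_cons, List.mem_cons, List.mem_map]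
      constructor
      · rintro ⟨h1, h2, hall⟩
        refine ⟨⟨?_, h1⟩, ⟨?_, h2⟩, ?_⟩
        · rintro ⟨q, hq, hq1⟩
          exact (hall q hq).1 ((PySem.Set.mem_add dep p.1 q.1).mpr (Or.inr hq1))
        · rintro ⟨q, hq, hq2⟩
          exact (hall q hq).2 ((PySem.Set.mem_add sid p.2 q.2).mpr (Or.inr hq2))
        · rintro q (rfl | hq)
          · exact ⟨h.1, h.2⟩
          · have hq' := hall q hq
            exact ⟨fun hm => hq'.1 ((PySem.Set.mem_add dep p.1 q.1).mpr (Or.inl hm)),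
                   fun hm => hq'.2 ((PySem.Set.mem_add sid p.2 q.2).mpr (Or.inl hm))⟩
      · rintro ⟨⟨hn1, h1⟩, ⟨hn2, h2⟩, hall⟩
        refine ⟨h1, h2, fun q hq => ?_⟩
        have hq' := hall q (Or.inr hq)
        constructor
        · intro hm
          rcases (PySem.Set.mem_add dep p.1 q.1).mp hm with hm' | heq
          · exact hq'.1 hm'
          · exact hn1 ⟨q, hq, heq⟩
        · intro hm
          rcases (PySem.Set.mem_add sid p.2 q.2).mp hm with hm' | heq
          · exact hq'.2 hm'
          · exact hn2 ⟨q, hq, heq⟩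

-- the index loop over range(len-1) is the adjacent-arrival chain
theorem pvSecondPass_iff (ps : List (Int × Int)) :
    pvSecondPass ps = true ↔ List.IsChain (fun a b : Int × Int => a.2 < b.2) ps := by
  rw [pvSecondPass, List.all_eq_true, List.isChain_iff_getElem]
  constructor
  · intro h i hi
    have hm : ((i : Nat) : Int) ∈ PySem.List.pyRange 0 ((ps.length : Int) - 1) 1 := by
      rw [PySem.List.mem_pyRange_one]; omega
    have hthis := h _ hm
    rw [decide_eq_true_eq,
      PySem.List.pyGetD_eq_getElem ps (0, 0) (by omega) (by push_cast; omega),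
      PySem.List.pyGetD_eq_getElem ps (0, 0) (by omega) (by push_cast; omega)] at hthis
    convert hthis using 3 <;> omega
  · intro h idx hm
    rw [PySem.List.mem_pyRange_one] at hm
    rw [decide_eq_true_eq,
      PySem.List.pyGetD_eq_getElem ps (0, 0) (by omega) (by omega),
      PySem.List.pyGetD_eq_getElem ps (0, 0) (by omega) (by omega)]
    convert h idx.toNat (by omega) using 3 <;> omega

-- B's scan is the adjacent chain of "different departure and increasing arrival"
theorem pvAdjOk_iff (ps : List (Int × Int)) :
    pvAdjOk ps = true ↔ List.IsChain (fun a b : Int × Int => a.1 ≠ b.1 ∧ a.2 < b.2) ps := by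
  induction ps with
  | nil => simp [pvAdjOk]
  | cons a t ih =>
    cases t with
    | nil => simp [pvAdjOk]
    | cons b r =>
      rw [List.isChain_cons_cons, ← ih]
      simp only [pvAdjOk]
      by_cases h : a.1 = b.1 ∨ ¬ a.2 < b.2
      · rw [if_pos (by simpa using h)]
        constructor
        · intro hfalse; simp at hfalse
        · rintro ⟨⟨hne, hlt⟩, -⟩
          exfalso; tauto
      · rw [if_neg (by simpa using h)]
        push_neg at h
        tauto

-- sorted-list chain to Nodup of a projected component
theorem nodup_of_isChain_lt (f : Int × Int → Int) (s : List (Int × Int))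
    (h : List.IsChain (fun a b => f a < f b) s) : (s.map f).Nodup := by
  have h2 : List.IsChain (· < ·) (s.map f) :=
    (List.isChain_map (f := f) (R := ((· < ·) : Int → Int → Prop))).2 h
  have hp := List.isChain_iff_pairwise.mp h2
  exact hp.imp (fun hlt => ne_of_lt hlt)

-- the heart: on a lexicographically sorted list, A's validity equals B's adjacent scan
theorem valid_eq_on_sorted (s : List (Int × Int))
    (hs : List.Pairwise (fun a b : Int × Int => (toLex a : Int ×ₗ Int) ≤ toLex b) s) :
    ((s.map Prod.fst).Nodup ∧ (s.map Prod.snd).Nodup ∧ List.IsChain (fun a b : Int × Int => a.2 < b.2) s)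
      ↔ List.IsChain (fun a b : Int × Int => a.1 ≠ b.1 ∧ a.2 < b.2) s := by
  constructor
  · rintro ⟨hf, -, hj⟩
    rw [List.isChain_iff_getElem]
    intro i hi
    refine ⟨?_, List.isChain_iff_getElem.mp hj i hi⟩
    have hne : List.Pairwise (fun a b : Int × Int => a.1 ≠ b.1) s := List.pairwise_map.mp hf
    exact List.pairwise_iff_getElem.mp hne i (i + 1) (by omega) hi (by omega)
  · intro hB
    have hlt : List.IsChain (fun a b : Int × Int => a.1 < b.1) s := by
      rw [List.isChain_iff_getElem] at hB ⊢
      intro i hi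
      have hle := List.pairwise_iff_getElem.mp hs i (i + 1) (by omega) hi (by omega)
      rw [Prod.Lex.le_iff] at hle
      have hadj := hB i hi
      rcases hle with hlt' | ⟨h1, -⟩
      · exact hlt'
      · exact absurd h1 hadj.1
    exact ⟨nodup_of_isChain_lt Prod.fst s hlt,
           nodup_of_isChain_lt Prod.snd s (hB.imp (fun _ _ hc => hc.2)),
           hB.imp (fun _ _ hc => hc.2)⟩

-- A's whole validity test equals B's sorted adjacent scan
theorem is_valid_eq_adjOk (pairs : List (Int × Int)) :
    pv_is_valid_pairs pairs = pvAdjOk (PySem.List.sorted2 pairs (fun p => p.1) (fun p => p.2) false) := by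
  have hs' : PySem.List.sorted2 pairs (fun p => p.1) (fun p => p.2) false
      = PySem.List.sorted pairs (fun p => (toLex p : Int ×ₗ Int)) false := sorted2_eq_sorted_toLex pairs
  set s := PySem.List.sorted2 pairs (fun p => p.1) (fun p => p.2) false with hsdef
  have hperm : s.Perm pairs := by rw [hs']; exact PySem.List.sorted_perm pairs _ false
  have hsorted : List.Pairwise (fun a b : Int × Int => (toLex a : Int ×ₗ Int) ≤ toLex b) s := by
    rw [hs']; exact PySem.List.sorted_pairwise pairs _
  rw [Bool.eq_iff_iff, pv_is_valid_pairs, Bool.and_eq_true, pvFirstPass_iff, pvSecondPass_iff,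
    ← hsdef, pvAdjOk_iff, ← valid_eq_on_sorted s hsorted]
  have e1 : (pairs.map Prod.fst).Nodup ↔ (s.map Prod.fst).Nodup := ((hperm.map Prod.fst).nodup_iff).symm
  have e2 : (pairs.map Prod.snd).Nodup ↔ (s.map Prod.snd).Nodup := ((hperm.map Prod.snd).nodup_iff).symm
  simp only [PySem.Set.empty, List.not_mem_nil, not_false_iff, and_self, imp_true_iff, and_true]
  tauto

-- ===== VERDICT (by name: the statement is the Claim_ definition above) =====
theorem evaluate_mask_spec : Claim_equal_evaluate_mask := by
  intro mask candidates _
  show evaluate_mask mask candidates = evaluate_mask_alt mask candidates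
  unfold evaluate_mask evaluate_mask_alt
  rw [pvPairsLoopA_eq, List.nil_append]
  dsimp only
  simp only [zero_add]
  generalize (PySem.List.enumerate candidates 0).filterMap
    (fun e => if PySem.Int.band (mask >>> e.1.toNat) 1 ≠ 0 then some (e.2.1, e.2.2.1) else none) = pairs
  by_cases h0 : pairs.length = 0
  · rw [if_pos (by exact_mod_cast h0), if_pos h0]
  · rw [if_neg (by exact_mod_cast h0), if_neg h0, is_valid_eq_adjOk]
    by_cases hv : pvAdjOk (PySem.List.sorted2 pairs (fun p => p.1) (fun p => p.2) false) = true
    · rw [if_pos hv, if_neg (by simp [hv])]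
    · rw [if_neg hv, if_pos (by simp [hv])]
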